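-- pv_equiv track=rewrite | github.com/Jaeyeop-Jung/CodingTest | 프로그래머스/Lv2/2회차/Lv2. 삼각 달팽이.py | solution
-- ===== SOURCE A (Python) =====
-- def solution(n):
--     result = [[] for i in range(n)]
--     for i in range(n):
--         for j in range(i + 1):
--             result[i].append(0)
--
--     cnt = 0
--     row, column = -1, 0
--     idx = 1
--     for i in range(n, 0, -1):
--         for j in range(i):
--             if cnt == 0:
--                 row += 1
--             elif cnt == 1:
--                 column += 1
--             else:
--                 row, column = row - 1, column - 1
--             result[row][column] = idx
--             idx += 1
--         cnt += 1
--         cnt %= 3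
--
--     # return [result[i][j] for i in range(len(result)) for j in range(len(result[i]))]
--     return sum(result, [])
-- ===== SOURCE B (Python) =====
-- def solution(n):
--     rows = [[0] * (i + 1) for i in range(n)]
--     # peel triangular rings: left edge down, bottom edge right, hypotenuse up,
--     # then move to the inner triangle (apex two rows down, one column right)
--     size, r0, c0, val = n, 0, 0, 1
--     while size > 0:
--         for k in range(size):
--             rows[r0 + k][c0] = val + k
--         val += size
--         for k in range(1, size):
--             rows[r0 + size - 1][c0 + k] = val
--             val += 1
--         for k in range(size - 2):
--             rows[r0 + size - 2 - k][c0 + size - 2 - k] = val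
--             val += 1
--         size, r0, c0 = size - 3, r0 + 2, c0 + 1
--     return [x for row in rows for x in row]
-- ===== Notes on version B (the rewrite author's own statement) =====
-- stated objective: alternative
-- what changed: Replaces A's single snail walk with mutable direction state (cnt cycling 0/1/2 and per-cell row/col updates) by a divide-and-conquer peeling of nested triangular rings whose three edges are written by plain range loops with arithmetically computed coordinates.
import Mathlib
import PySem

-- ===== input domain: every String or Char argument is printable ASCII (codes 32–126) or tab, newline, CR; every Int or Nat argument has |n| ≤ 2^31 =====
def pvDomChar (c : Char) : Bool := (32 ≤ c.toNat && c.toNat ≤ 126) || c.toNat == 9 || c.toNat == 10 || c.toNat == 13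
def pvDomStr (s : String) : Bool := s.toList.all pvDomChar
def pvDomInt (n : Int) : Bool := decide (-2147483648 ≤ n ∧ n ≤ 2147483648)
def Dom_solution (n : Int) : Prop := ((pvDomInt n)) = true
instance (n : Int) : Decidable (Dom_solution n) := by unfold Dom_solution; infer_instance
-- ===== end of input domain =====

-- B replaces A's single direction-cycling walk (mutable row/col/cnt state) by a
-- divide-and-conquer peeling of nested triangular rings with arithmetically computed
-- cell coordinates (objective: alternative decomposition; a timing run measured
-- B faster by a constant factor).

-- ===== PORT A =====
-- result[row][column] = idx; on every reachable state the indices are in range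
-- (Python would raise IndexError otherwise; that never happens in A's runs).
def setCell (m : List (List Int)) (r c v : Int) : List (List Int) :=
  m.modify r.toNat (fun row => row.set c.toNat v)

-- state (cnt, row, column, idx, result)
def stepA (st : Int × Int × Int × Int × List (List Int)) :
    Int × Int × Int × Int × List (List Int) :=
  let rc : Int × Int :=
    if st.1 = 0 then (st.2.1 + 1, st.2.2.1)
    else if st.1 = 1 then (st.2.1, st.2.2.1 + 1)
    else (st.2.1 - 1, st.2.2.1 - 1)
  (st.1, rc.1, rc.2, st.2.2.2.1 + 1, setCell st.2.2.2.2 rc.1 rc.2 st.2.2.2.1)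

-- for j in range(i): …  (the body ignores j)
def innerA (steps : List Int) (st : Int × Int × Int × Int × List (List Int)) :
    Int × Int × Int × Int × List (List Int) :=
  steps.foldl (fun st _ => stepA st) st

-- for i in range(n, 0, -1): …  then cnt = (cnt + 1) % 3
def outerA : List Int → Int × Int × Int × Int × List (List Int) →
    Int × Int × Int × Int × List (List Int)
  | [], st => st
  | i :: rest, st =>
    let st2 := innerA (PySem.List.pyRange 0 i 1) st
    outerA rest (PySem.Int.mod (st2.1 + 1) 3, st2.2.1, st2.2.2.1, st2.2.2.2.1, st2.2.2.2.2)

-- result = [[] for i in range(n)]; for i in range(n): for j in range(i+1): result[i].append(0)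
def initA (n : Int) : List (List Int) :=
  (PySem.List.pyRange 0 n 1).foldl
    (fun res i => (PySem.List.pyRange 0 (i + 1) 1).foldl
      (fun res _ => res.modify i.toNat (fun row => row ++ [0])) res)
    ((PySem.List.pyRange 0 n 1).map (fun _ => ([] : List Int)))

def solution (n : Int) : List Int :=
  (outerA (PySem.List.pyRange n 0 (-1)) (0, -1, 0, 1, initA n)).2.2.2.2.foldl
    (fun acc r => acc ++ r) []   -- sum(result, [])

-- ===== PORT B =====
-- fill(size, r0, c0, val): write the three outer edges of the sub-triangle with apex
-- (r0, c0), then recurse on the inner triangle.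
def fillB (size r0 c0 val : Int) (rows : List (List Int)) : List (List Int) :=
  if size ≤ 0 then rows
  else
    -- for k in range(size): rows[r0+k][c0] = val + k
    let rows1 := (List.range size.toNat).foldl
      (fun m (k : Nat) => setCell m (r0 + (k : Int)) c0 (val + (k : Int))) rows
    let val1 := val + size
    -- for k in range(1, size): rows[r0+size-1][c0+k] = val; val += 1
    let p2 := (List.range (size.toNat - 1)).foldl
      (fun (p : List (List Int) × Int) (k : Nat) =>
        (setCell p.1 (r0 + size - 1) (c0 + ((k : Int) + 1)) p.2, p.2 + 1)) (rows1, val1)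
    -- for k in range(size-2): rows[r0+size-2-k][c0+size-2-k] = val; val += 1
    let p3 := (List.range (size.toNat - 2)).foldl
      (fun (p : List (List Int) × Int) (k : Nat) =>
        (setCell p.1 (r0 + size - 2 - (k : Int)) (c0 + size - 2 - (k : Int)) p.2, p.2 + 1)) p2
    fillB (size - 3) (r0 + 2) (c0 + 1) p3.2 p3.1
termination_by size.toNat
decreasing_by rename_i h; omega

def solution_alt (n : Int) : List Int :=
  (fillB n 0 0 1
    ((PySem.List.pyRange 0 n 1).map (fun i => List.replicate (i + 1).toNat (0 : Int)))).flatMap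
    (fun row => row)   -- [x for row in rows for x in row]

-- ===== PRECONDITION & SPEC =====
def Spec_solution (n : Int) (out : List Int) : Prop := out = solution_alt n
instance (n : Int) (out : List Int) : Decidable (Spec_solution n out) := by unfold Spec_solution; infer_instance

-- ===== CLAIM (what is proved, stated in full; the proofs are below) =====
def Claim_equal_solution : Prop := ∀ (n : Int), Dom_solution n → Spec_solution n (solution n)

-- ===== LEMMAS AND PROOFS =====

lemma foldl_append_eq_flatten (xs : List (List Int)) (acc : List Int) :
    xs.foldl (fun a r => a ++ r) acc = acc ++ xs.flatten := by
  induction xs generalizing acc with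
  | nil => simp
  | cons x xs ih => simp [ih, List.append_assoc]

lemma modify_modify_same (l : List (List Int)) (i : Nat) (f g : List Int → List Int) :
    (l.modify i f).modify i g = l.modify i (fun x => g (f x)) := by
  apply List.ext_getElem
  · simp
  · intro j h1 h2
    simp only [List.getElem_modify]
    split <;> simp_all

lemma modify_at_length (l t : List (List Int)) (x : List Int) (f : List Int → List Int) :
    (l ++ x :: t).modify l.length f = l ++ f x :: t := by
  apply List.ext_getElem
  · simp
  · intro j h1 h2
    rw [List.getElem_modify]
    rcases lt_trichotomy j l.length with h | h | h
    · rw [if_neg (by omega)]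
      rw [List.getElem_append_left h, List.getElem_append_left h]
    · subst h
      rw [if_pos rfl]
      simp
    · rw [if_neg (by omega)]
      rw [List.getElem_append_right (by omega), List.getElem_append_right (by omega)]
      obtain ⟨d, hd⟩ : ∃ d, j - l.length = d + 1 := ⟨j - l.length - 1, by omega⟩
      simp [hd]

lemma modify_at_length' (l t : List (List Int)) (x : List Int) (f : List Int → List Int)
    (i : Nat) (h : i = l.length) : (l ++ x :: t).modify i f = l ++ f x :: t := by
  subst h; exact modify_at_length l t x f

-- innerA depends only on the number of steps
lemma innerA_eq_iterate (steps : List Int) (st : Int × Int × Int × Int × List (List Int)) :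
    innerA steps st = stepA^[steps.length] st := by
  induction steps generalizing st with
  | nil => simp [innerA]
  | cons a l ih => simp [innerA, List.foldl_cons, Function.iterate_succ_apply]
                   exact ih (stepA st)

lemma innerA_pyRange (i : Int) (st : Int × Int × Int × Int × List (List Int)) :
    innerA (PySem.List.pyRange 0 i 1) st = stepA^[i.toNat] st := by
  rw [innerA_eq_iterate, PySem.List.length_pyRange_one]
  norm_num

-- the three leg shapes of A's walk
lemma iter0 (k : Nat) (r c v : Int) (m : List (List Int)) :
    stepA^[k] (0, r, c, v, m)
      = (0, r + k, c, v + k,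
         (List.range k).foldl (fun m (j : Nat) => setCell m (r + 1 + (j : Int)) c (v + (j : Int))) m) := by
  induction k with
  | zero => simp
  | succ k ih =>
    rw [Function.iterate_succ_apply', ih, List.range_succ, List.foldl_append]
    simp only [stepA, List.foldl_cons, List.foldl_nil]
    norm_num
    refine ⟨by ring, by ring, ?_⟩
    congr 1
    ring

lemma iter1 (k : Nat) (r c v : Int) (m : List (List Int)) :
    stepA^[k] (1, r, c, v, m)
      = (1, r, c + k, v + k,
         (List.range k).foldl (fun m (j : Nat) => setCell m r (c + 1 + (j : Int)) (v + (j : Int))) m) := by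
  induction k with
  | zero => simp
  | succ k ih =>
    rw [Function.iterate_succ_apply', ih, List.range_succ, List.foldl_append]
    simp only [stepA, List.foldl_cons, List.foldl_nil]
    norm_num
    refine ⟨by ring, by ring, ?_⟩
    congr 1
    ring

lemma iter2 (k : Nat) (r c v : Int) (m : List (List Int)) :
    stepA^[k] (2, r, c, v, m)
      = (2, r - k, c - k, v + k,
         (List.range k).foldl (fun m (j : Nat) => setCell m (r - 1 - (j : Int)) (c - 1 - (j : Int)) (v + (j : Int))) m) := by
  induction k with
  | zero => simp
  | succ k ih =>
    rw [Function.iterate_succ_apply', ih, List.range_succ, List.foldl_append]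
    simp only [stepA, List.foldl_cons, List.foldl_nil]
    norm_num
    exact ⟨by ring, by ring, by ring, by congr 1 <;> ring⟩

-- B's value-carrying pair folds collapse to plain matrix folds
lemma pairFold2 (R C : Int) (t : Nat) (m : List (List Int)) (w : Int) :
    (List.range t).foldl
        (fun (p : List (List Int) × Int) (k : Nat) =>
          (setCell p.1 R (C + ((k : Int) + 1)) p.2, p.2 + 1)) (m, w)
      = ((List.range t).foldl (fun m (k : Nat) => setCell m R (C + ((k : Int) + 1)) (w + (k : Int))) m,
         w + t) := by
  induction t with
  | zero => simp
  | succ t ih =>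
    rw [List.range_succ, List.foldl_append, List.foldl_append, ih]
    simp
    ring

lemma pairFold3 (R C : Int) (t : Nat) (m : List (List Int)) (w : Int) :
    (List.range t).foldl
        (fun (p : List (List Int) × Int) (k : Nat) =>
          (setCell p.1 (R - (k : Int)) (C - (k : Int)) p.2, p.2 + 1)) (m, w)
      = ((List.range t).foldl (fun m (k : Nat) => setCell m (R - (k : Int)) (C - (k : Int)) (w + (k : Int))) m,
         w + t) := by
  induction t with
  | zero => simp
  | succ t ih =>
    rw [List.range_succ, List.foldl_append, List.foldl_append, ih]
    simp
    ring

lemma outer_cons (i : Int) (rest : List Int) (st : Int × Int × Int × Int × List (List Int)) :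
    outerA (i :: rest) st
      = outerA rest (PySem.Int.mod ((stepA^[i.toNat] st).1 + 1) 3, (stepA^[i.toNat] st).2.1,
          (stepA^[i.toNat] st).2.2.1, (stepA^[i.toNat] st).2.2.2.1, (stepA^[i.toNat] st).2.2.2.2) := by
  simp [outerA, innerA_pyRange]

-- the main equivalence of the walks: A's loop over sizes s, s-1, …, 1 starting a fresh
-- ring (cnt = 0, row just above the apex) equals B's recursive ring peeling.
lemma mainLemma (s : Nat) : ∀ (r0 c0 v : Int) (m : List (List Int)),
    (outerA (PySem.List.pyRange (s : Int) 0 (-1)) (0, r0 - 1, c0, v, m)).2.2.2.2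
      = fillB (s : Int) r0 c0 v m := by
  induction s using Nat.strong_induction_on with
  | _ s ih =>
  intro r0 c0 v m
  obtain rfl | rfl | rfl | ⟨t, rfl⟩ : s = 0 ∨ s = 1 ∨ s = 2 ∨ ∃ t, s = t + 3 := by
    rcases s with _ | _ | _ | t
    · exact Or.inl rfl
    · exact Or.inr (Or.inl rfl)
    · exact Or.inr (Or.inr (Or.inl rfl))
    · exact Or.inr (Or.inr (Or.inr ⟨t, rfl⟩))
  · rw [PySem.List.pyRange_neg_one_eq_nil (by norm_num)]
    simp [outerA, fillB]
  · rw [show ((1:Nat) : Int) = 1 by norm_num,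
        PySem.List.pyRange_neg_one_cons (by norm_num : (0:Int) < 1),
        show (1:Int) - 1 = 0 by norm_num,
        PySem.List.pyRange_neg_one_eq_nil (by norm_num : (0:Int) ≤ 0)]
    rw [outer_cons]
    simp only [outerA]
    rw [show ((1:Int)).toNat = 1 by norm_num, iter0]
    rw [fillB]
    norm_num
    rw [fillB]
    norm_num
  · rw [show ((2:Nat) : Int) = 2 by norm_num,
        PySem.List.pyRange_neg_one_cons (by norm_num : (0:Int) < 2),
        show (2:Int) - 1 = 1 by norm_num,
        PySem.List.pyRange_neg_one_cons (by norm_num : (0:Int) < 1),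
        show (1:Int) - 1 = 0 by norm_num,
        PySem.List.pyRange_neg_one_eq_nil (by norm_num : (0:Int) ≤ 0)]
    rw [outer_cons, show ((2:Int)).toNat = 2 by decide, iter0]
    dsimp only
    rw [show PySem.Int.mod ((0:Int) + 1) 3 = 1 by decide]
    rw [outer_cons, show ((1:Int)).toNat = 1 by norm_num, iter1]
    dsimp only [outerA]
    rw [fillB]
    norm_num [List.range_succ]
    rw [fillB]
    norm_num
    rw [show Int.toNat 2 = 2 by decide]
    norm_num [List.range_succ]
    ring_nf
  · rw [show ((t + 3 : Nat) : Int) = (t : Int) + 3 by push_cast; ring,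
        PySem.List.pyRange_neg_one_cons (by omega : (0:Int) < (t : Int) + 3),
        show (t : Int) + 3 - 1 = (t : Int) + 2 by ring,
        PySem.List.pyRange_neg_one_cons (by omega : (0:Int) < (t : Int) + 2),
        show (t : Int) + 2 - 1 = (t : Int) + 1 by ring,
        PySem.List.pyRange_neg_one_cons (by omega : (0:Int) < (t : Int) + 1),
        show (t : Int) + 1 - 1 = (t : Int) by ring]
    rw [outer_cons, show ((t : Int) + 3).toNat = t + 3 by omega, iter0]
    dsimp only
    rw [show PySem.Int.mod ((0:Int) + 1) 3 = 1 by decide]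
    rw [outer_cons, show ((t : Int) + 2).toNat = t + 2 by omega, iter1]
    dsimp only
    rw [show PySem.Int.mod ((1:Int) + 1) 3 = 2 by decide]
    rw [outer_cons, show ((t : Int) + 1).toNat = t + 1 by omega, iter2]
    dsimp only
    rw [show PySem.Int.mod ((2:Int) + 1) 3 = 0 by decide]
    rw [show r0 - 1 + ((t + 3 : Nat) : Int) - ((t + 1 : Nat) : Int) = (r0 + 2) - 1 by push_cast; ring]
    rw [ih t (by omega)]
    conv_rhs => rw [fillB]
    rw [if_neg (by omega : ¬ ((t : Int) + 3 ≤ 0))]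
    dsimp only
    rw [show ((t : Int) + 3).toNat = t + 3 by omega]
    rw [pairFold2, pairFold3]
    dsimp only
    rw [show (t + 3 - 1 : Nat) = t + 2 from rfl, show (t + 3 - 2 : Nat) = t + 1 from rfl,
        show (t : Int) + 3 - 3 = ((t : Nat) : Int) by ring]
    push_cast
    ring_nf

lemma append_zeros (t : Nat) (i : Nat) (res : List (List Int)) :
    (List.range t).foldl (fun r (_ : Nat) => r.modify i (fun row => row ++ [0])) res
      = res.modify i (fun row => row ++ List.replicate t (0 : Int)) := by
  induction t generalizing res with
  | zero =>
    simp only [List.range_zero, List.foldl_nil, List.replicate_zero, List.append_nil]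
    exact (List.modify_id i res).symm
  | succ t ih =>
    rw [List.range_succ, List.foldl_append, ih, List.foldl_cons, List.foldl_nil,
        modify_modify_same]
    simp [List.replicate_succ', List.append_assoc]

lemma init_fold_gen (N : Nat) : ∀ (tail : List (List Int)),
    (List.range N).foldl
        (fun res (k : Nat) => res.modify k (fun row => row ++ List.replicate (k + 1) (0 : Int)))
        ((List.range N).map (fun _ => ([] : List Int)) ++ tail)
      = (List.range N).map (fun k => List.replicate (k + 1) (0 : Int)) ++ tail := by
  induction N with
  | zero => simp
  | succ N ih =>
    intro tail
    rw [List.range_succ, List.map_append, List.map_append, List.foldl_append]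
    rw [List.map_singleton, List.map_singleton, List.append_assoc, List.singleton_append]
    rw [ih ([] :: tail), List.foldl_cons, List.foldl_nil]
    rw [modify_at_length' _ _ _ _ _ (by simp)]
    simp [List.append_assoc]

lemma initA_eq (n : Int) :
    initA n = (PySem.List.pyRange 0 n 1).map (fun i => List.replicate (i + 1).toNat (0 : Int)) := by
  unfold initA
  rcases le_or_gt n 0 with hn | hn
  · rw [PySem.List.pyRange_one_eq_nil hn]
    simp
  · obtain ⟨N, rfl⟩ : ∃ N : Nat, n = (N : Int) := ⟨n.toNat, by omega⟩
    rw [PySem.List.pyRange_zero_natCast, List.foldl_map]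
    simp only [Int.toNat_natCast, List.map_map]
    have hinner : ∀ (res : List (List Int)) (k : Nat),
        (PySem.List.pyRange 0 ((k : Int) + 1) 1).foldl
            (fun res _ => res.modify k (fun row => row ++ [0])) res
          = res.modify k (fun row => row ++ List.replicate (k + 1) (0 : Int)) := by
      intro res k
      rw [show ((k : Int) + 1) = ((k + 1 : Nat) : Int) by push_cast; ring,
          PySem.List.pyRange_zero_natCast, List.foldl_map]
      exact append_zeros (k + 1) k res
    simp only [hinner, Function.comp_def]
    have := init_fold_gen N []
    rw [List.append_nil, List.append_nil] at this
    rw [this]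
    apply List.map_congr_left
    intro k hk
    simp

-- ===== VERDICT (by name: the statement is the Claim_ definition above) =====
theorem solution_spec : Claim_equal_solution := by
  intro n _
  unfold Spec_solution solution solution_alt
  rw [initA_eq]
  by_cases hn : n ≤ 0
  · rw [PySem.List.pyRange_neg_one_eq_nil hn, PySem.List.pyRange_one_eq_nil hn]
    simp [outerA, fillB, hn]
  · rw [not_le] at hn
    have hrepr : n = ((n.toNat : Nat) : Int) := by omega
    rw [hrepr]
    have := mainLemma n.toNat 0 0 1
      ((PySem.List.pyRange 0 ((n.toNat : Nat) : Int) 1).map (fun i => List.replicate (i + 1).toNat (0 : Int)))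
    rw [show ((0 : Int) - 1) = -1 by ring] at this
    rw [this, foldl_append_eq_flatten, List.flatMap_id']
    simp
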